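-- pv_equiv track=rewrite | github.com/Bolvvv/cut_a4_paper | detect.py | sort_mapping
-- ===== SOURCE A (Python) =====
-- import math
--
-- def sort_mapping(img_list):
--     img_list_len = len(img_list)
--     sorted_list = [None]*img_list_len
--     if img_list_len%2 == 0:
--         sorted_list[img_list_len-1] = img_list[0]#先讲二维码所属位置赋值
--         img_list.pop(0)#再将二维码的值去掉
--         img_list_len -= 1#将长度减一
--     left_len = math.ceil(img_list_len/2)
--     right_len = img_list_len-left_len
--     for i in range(0, 2*left_len, 2):
--         sorted_list[img_list_len-i-1] = img_list[int(i/2)]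
--     for i in range(2, 2*right_len+2, 2):
--         sorted_list[i-1] = img_list[int(i/2)+left_len-1]
--     return sorted_list
-- ===== SOURCE B (Python) =====
-- def sort_mapping(img_list):
--     n = len(img_list)
--     tail = []
--     if n % 2 == 0:
--         tail = [img_list.pop(0)]   # the QR code occupies the last output slot
--         n -= 1
--     # walk outward from the centre: centre, right, left, further right, further left, ...
--     out = []
--     i = n // 2
--     j = i + 1
--     while i >= 0:
--         out.append(img_list[i])
--         if j < n:
--             out.append(img_list[j])
--         i -= 1
--         j += 1
--     return out + tail
-- ===== Notes on version B (the rewrite author's own statement) =====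
-- stated objective: alternative
-- what changed: Instead of A's two arithmetic-index assignment loops into a preallocated slot list, B emits the elements in output order by a single two-pointer walk outward from the centre of the (QR-stripped) list (centre, right neighbour, left neighbour, next right, next left, ...), appending the QR element last.
import Mathlib
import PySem

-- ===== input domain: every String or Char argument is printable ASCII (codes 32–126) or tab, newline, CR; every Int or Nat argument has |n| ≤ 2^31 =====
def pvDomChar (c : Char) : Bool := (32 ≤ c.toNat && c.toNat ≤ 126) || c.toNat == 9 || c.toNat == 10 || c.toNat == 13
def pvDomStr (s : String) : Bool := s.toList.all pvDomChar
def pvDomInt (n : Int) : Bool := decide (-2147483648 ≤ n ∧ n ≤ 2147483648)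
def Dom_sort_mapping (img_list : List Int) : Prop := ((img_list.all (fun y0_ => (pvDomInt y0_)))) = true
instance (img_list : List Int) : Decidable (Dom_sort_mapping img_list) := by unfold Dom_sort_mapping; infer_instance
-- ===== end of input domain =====

-- B replaces A's two arithmetic-index assignment loops by a single two-pointer walk outward from the
-- centre of the (QR-stripped) list (objective: alternative decomposition, same cost).
-- Both Pythons pop(0) the argument on even length (identical mutation); the equivalence proved here is about the return value.


-- ===== PORT A =====
-- [None]*n is modelled as 0-placeholders: under Pre_ every slot is overwritten (or, on even
-- length, set to the QR element first), so no placeholder survives into the result.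
-- math.ceil(n/2) is ported as (n+1)/2: n is odd whenever this line is reached on a Pre_ input,
-- so n+1 is even and the division is exact.  int(i/2) is ported as i/2 (i is even and ≥ 0 here).
def sort_mapping (img_list : List Int) : List Int :=
  let img_list_len : Int := (img_list.length : Int)
  let sorted_list : List Int := List.replicate img_list.length 0
  let step1 : List Int × List Int × Int :=
    if img_list_len % 2 == 0 then
      (PySem.List.pySetD sorted_list (img_list_len - 1) (PySem.List.pyGetD img_list 0 0),
       img_list.drop 1,          -- img_list.pop(0)
       img_list_len - 1)
    else
      (sorted_list, img_list, img_list_len)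
  let left_len : Int := (step1.2.2 + 1) / 2
  let right_len : Int := step1.2.2 - left_len
  let r1 := (PySem.List.pyRange 0 (2 * left_len) 2).foldl
      (fun s i => PySem.List.pySetD s (step1.2.2 - i - 1) (PySem.List.pyGetD step1.2.1 (i / 2) 0)) step1.1
  (PySem.List.pyRange 2 (2 * right_len + 2) 2).foldl
      (fun s i => PySem.List.pySetD s (i - 1) (PySem.List.pyGetD step1.2.1 (i / 2 + left_len - 1) 0)) r1

-- ===== PORT B =====
-- the while-loop of Source B: i walks down from the centre, j walks up; each iteration appends
-- img_list[i] and, if j is still in range, img_list[j]; the loop stops after the i = 0 iteration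
-- (on Pre_ inputs both indices are always in range, so list.getD's default is never used)
def pvZigzag (lst : List Int) (n : Nat) (i j : Nat) : List Int :=
  (lst.getD i 0 :: (if j < n then [lst.getD j 0] else [])) ++
  (if h : 0 < i then pvZigzag lst n (i - 1) (j + 1) else [])
termination_by i

def sort_mapping_alt (img_list : List Int) : List Int :=
  let n := img_list.length
  if n % 2 == 0 then
    match img_list with
    | [] => []                    -- img_list.pop(0) raises IndexError here (outside Pre_)
    | q :: rest => pvZigzag rest rest.length (rest.length / 2) (rest.length / 2 + 1) ++ [q]
  else
    pvZigzag img_list n (n / 2) (n / 2 + 1)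

-- ===== PRECONDITION & SPEC =====
-- Pre_ excludes only the empty list, on which A raises IndexError (img_list[0]).
def Pre_sort_mapping (img_list : List Int) : Prop := img_list ≠ []
instance (img_list : List Int) : Decidable (Pre_sort_mapping img_list) := by unfold Pre_sort_mapping; infer_instance
def pvWitness_sort_mapping : List Int := [1, 2, 3, 4, 5]
def Spec_sort_mapping (img_list : List Int) (out : List Int) : Prop := out = sort_mapping_alt img_list
instance (img_list : List Int) (out : List Int) : Decidable (Spec_sort_mapping img_list out) := by unfold Spec_sort_mapping; infer_instance

-- ===== CLAIM (what is proved, stated in full; the proofs are below) =====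
def Claim_equal_sort_mapping : Prop := ∀ (img_list : List Int), Dom_sort_mapping img_list → Pre_sort_mapping img_list → Spec_sort_mapping img_list (sort_mapping img_list)

-- ===== LEMMAS AND PROOFS =====

-- along the walk j + i = n is invariant; characterise the emitted list positionally
theorem pvZigzag_getElem? (lst : List Int) (n : Nat) (hn : n = lst.length) :
    ∀ i, i < n → ∀ p : Nat,
    (pvZigzag lst n i (n - i))[p]? =
      if p % 2 = 0 then (if p / 2 ≤ i then lst[i - p / 2]? else none)
      else (if (p + 1) / 2 ≤ i then lst[n - i + (p - 1) / 2]? else none) := by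
  intro i
  induction i with
  | zero =>
    intro hi p
    rw [pvZigzag]
    rw [dif_neg (by omega), if_neg (by omega)]
    have h0 : lst.getD 0 0 = lst[0]'(by omega) := List.getD_eq_getElem lst 0 (by omega)
    match p with
    | 0 =>
      simp only [List.cons_append, List.nil_append, List.append_nil,
        List.getElem?_cons_zero, h0]
      norm_num
    | p + 1 =>
      simp only [List.cons_append, List.nil_append, List.append_nil,
        List.getElem?_cons_succ, List.getElem?_nil]
      rcases Nat.mod_two_eq_zero_or_one (p + 1) with h | h
      · rw [if_pos h, if_neg (by omega)]
      · rw [if_neg (by omega), if_neg (by omega)]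
  | succ i' ih =>
    intro hi p
    rw [pvZigzag]
    rw [dif_pos (by omega), if_pos (by omega)]
    have hj : n - (i' + 1) + 1 = n - i' := by omega
    rw [Nat.succ_sub_one, hj]
    have h0 : lst.getD (i' + 1) 0 = lst[i' + 1]'(by omega) := List.getD_eq_getElem lst 0 (by omega)
    have h1 : lst.getD (n - (i' + 1)) 0 = lst[n - (i' + 1)]'(by omega) := List.getD_eq_getElem lst 0 (by omega)
    match p with
    | 0 =>
      simp only [List.cons_append, List.nil_append, List.getElem?_cons_zero, h0]
      norm_num
    | 1 =>
      simp only [List.cons_append, List.nil_append, List.getElem?_cons_succ,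
        List.getElem?_cons_zero, h1]
      rw [if_neg (by omega), if_pos (by omega)]
      have e : n - (i' + 1) + (1 - 1) / 2 = n - (i' + 1) := by omega
      rw [e, List.getElem?_eq_getElem (by omega)]
    | p + 2 =>
      simp only [List.cons_append, List.nil_append, List.getElem?_cons_succ]
      rw [ih (by omega) p]
      have em : (p + 2) % 2 = p % 2 := by omega
      rw [em]
      rcases Nat.mod_two_eq_zero_or_one p with h | h
      · rw [if_pos h, if_pos h]
        by_cases hc : p / 2 ≤ i'
        · rw [if_pos hc, if_pos (show (p + 2) / 2 ≤ i' + 1 by omega),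
            show i' - p / 2 = i' + 1 - (p + 2) / 2 by omega]
        · rw [if_neg hc, if_neg (show ¬ (p + 2) / 2 ≤ i' + 1 by omega)]
      · rw [if_neg (show ¬ p % 2 = 0 by omega), if_neg (show ¬ p % 2 = 0 by omega)]
        by_cases hc : (p + 1) / 2 ≤ i'
        · rw [if_pos hc, if_pos (show (p + 2 + 1) / 2 ≤ i' + 1 by omega),
            show n - i' + (p - 1) / 2 = n - (i' + 1) + (p + 2 - 1) / 2 by omega]
        · rw [if_neg hc, if_neg (show ¬ (p + 2 + 1) / 2 ≤ i' + 1 by omega)]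

theorem pvZigzag_length (lst : List Int) (n : Nat) :
    ∀ i, i < n → (pvZigzag lst n i (n - i)).length = 2 * i + 1 := by
  intro i
  induction i with
  | zero =>
    intro hi
    rw [pvZigzag, dif_neg (by omega), if_neg (by omega)]
    rfl
  | succ i' ih =>
    intro hi
    rw [pvZigzag, dif_pos (by omega), if_pos (by omega)]
    have hj : n - (i' + 1) + 1 = n - i' := by omega
    rw [Nat.succ_sub_one, hj]
    simp only [List.cons_append, List.length_cons, List.length_append, List.length_cons,
      List.length_nil, ih (by omega)]
    omega

theorem pyRange_zero_two (K : Nat) :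
    PySem.List.pyRange 0 (2 * (K : Int)) 2 = (List.range K).map (fun k : Nat => 2 * (k : Int)) := by
  rw [PySem.List.pyRange_of_pos _ _ (by norm_num)]
  have hc : (if (0:Int) < 2 * (K:Int) then ((2 * (K:Int) - 0 + 2 - 1) / 2).toNat else 0) = K := by
    rcases Nat.eq_zero_or_pos K with h | h
    · subst h; simp
    · rw [if_pos (by omega)]; omega
  rw [hc]
  exact List.map_congr_left (fun k _ => by ring)

theorem pyRange_two_two (K : Nat) :
    PySem.List.pyRange 2 (2 * (K : Int) + 2) 2 = (List.range K).map (fun k : Nat => 2 + 2 * (k : Int)) := by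
  rw [PySem.List.pyRange_of_pos _ _ (by norm_num)]
  have hc : (if (2:Int) < 2 * (K:Int) + 2 then ((2 * (K:Int) + 2 - 2 + 2 - 1) / 2).toNat else 0) = K := by
    rcases Nat.eq_zero_or_pos K with h | h
    · subst h; simp
    · rw [if_pos (by omega)]; omega
  rw [hc]

theorem length_foldl_pySetD (idx val : Int → Int) (l : List Int) :
    ∀ s : List Int, (l.foldl (fun s' i => PySem.List.pySetD s' (idx i) (val i)) s).length = s.length := by
  induction l with
  | nil => intro s; rfl
  | cons a l ih => intro s; rw [List.foldl_cons, ih, PySem.List.length_pySetD]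

theorem loop1_char (lst s : List Int) (m : Nat) (hs : m ≤ s.length) :
    ∀ (K : Nat), 2 * K ≤ m + 1 → ∀ p : Nat,
    (((List.range K).map (fun k : Nat => 2 * (k : Int))).foldl
        (fun s' i => PySem.List.pySetD s' ((m : Int) - i - 1) (PySem.List.pyGetD lst (i / 2) 0)) s)[p]? =
      if p % 2 = (m - 1) % 2 ∧ p < m ∧ m + 1 ≤ p + 2 * K then some (lst.getD ((m - 1 - p) / 2) 0)
      else s[p]? := by
  intro K
  induction K with
  | zero =>
    intro _ p
    rw [if_neg (by omega)]
    rfl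
  | succ K ih =>
    intro hK p
    rw [List.range_succ, List.map_append, List.foldl_append]
    rw [List.map_cons, List.map_nil, List.foldl_cons, List.foldl_nil]
    have hidx : (0:Int) ≤ (m : Int) - 2 * (K:Int) - 1 := by omega
    rw [PySem.List.pySetD_of_nonneg (h := hidx)]
    have htn : ((m : Int) - 2 * (K:Int) - 1).toNat = m - 1 - 2 * K := by omega
    have hdiv : (2 * (K:Int)) / 2 = (K : Int) := by omega
    rw [htn, hdiv, PySem.List.pyGetD_natCast]
    rw [List.getElem?_set]
    have hlen : (((List.range K).map (fun k : Nat => 2 * (k : Int))).foldl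
        (fun s' i => PySem.List.pySetD s' ((m : Int) - i - 1) (PySem.List.pyGetD lst (i / 2) 0)) s).length
        = s.length := length_foldl_pySetD _ _ _ s
    by_cases hp : m - 1 - 2 * K = p
    · rw [if_pos hp, if_pos (by omega), if_pos (by omega)]
      have : (m - 1 - p) / 2 = K := by omega
      rw [this]
    · rw [if_neg hp, ih (by omega) p]
      have : (p % 2 = (m - 1) % 2 ∧ p < m ∧ m + 1 ≤ p + 2 * K) ↔
             (p % 2 = (m - 1) % 2 ∧ p < m ∧ m + 1 ≤ p + 2 * (K + 1)) := by omega
      rw [if_congr this rfl rfl]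

theorem loop2_char (lst s : List Int) (c : Nat) :
    ∀ (K : Nat), 2 * K ≤ s.length → ∀ p : Nat,
    (((List.range K).map (fun k : Nat => 2 + 2 * (k : Int))).foldl
        (fun s' i => PySem.List.pySetD s' (i - 1) (PySem.List.pyGetD lst (i / 2 + (c : Int) - 1) 0)) s)[p]? =
      if p % 2 = 1 ∧ p < 2 * K then some (lst.getD ((p - 1) / 2 + c) 0)
      else s[p]? := by
  intro K
  induction K with
  | zero =>
    intro _ p
    rw [if_neg (by omega)]
    rfl
  | succ K ih =>
    intro hK p
    rw [List.range_succ, List.map_append, List.foldl_append]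
    rw [List.map_cons, List.map_nil, List.foldl_cons, List.foldl_nil]
    have hidx : (0:Int) ≤ 2 + 2 * (K:Int) - 1 := by omega
    rw [PySem.List.pySetD_of_nonneg (h := hidx)]
    have htn : ((2:Int) + 2 * (K:Int) - 1).toNat = 2 * K + 1 := by omega
    have hdiv : ((2:Int) + 2 * (K:Int)) / 2 + (c:Int) - 1 = ((K + c : Nat) : Int) := by push_cast; omega
    rw [htn, hdiv, PySem.List.pyGetD_natCast]
    rw [List.getElem?_set]
    have hlen : (((List.range K).map (fun k : Nat => 2 + 2 * (k : Int))).foldl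
        (fun s' i => PySem.List.pySetD s' (i - 1) (PySem.List.pyGetD lst (i / 2 + (c:Int) - 1) 0)) s).length
        = s.length := length_foldl_pySetD _ _ _ s
    by_cases hp : 2 * K + 1 = p
    · rw [if_pos hp, if_pos (by omega), if_pos (by omega)]
      have : (p - 1) / 2 + c = K + c := by omega
      rw [this]
    · rw [if_neg hp, ih (by omega) p]
      have : (p % 2 = 1 ∧ p < 2 * K) ↔ (p % 2 = 1 ∧ p < 2 * (K + 1)) := by omega
      rw [if_congr this rfl rfl]

-- the odd-length core shared by both branches: on positions p < lst.length A's two loops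
-- produce exactly the centre-outward walk of B
theorem core_getElem? (lst b : List Int) (L : Nat) (hm : lst.length + 1 = 2 * L) (_hL : 1 ≤ L)
    (hb : lst.length ≤ b.length) (p : Nat) (hp : p < lst.length) :
    (((List.range (L - 1)).map (fun k : Nat => 2 + 2 * (k : Int))).foldl
        (fun s' i => PySem.List.pySetD s' (i - 1) (PySem.List.pyGetD lst (i / 2 + (L : Int) - 1) 0))
        (((List.range L).map (fun k : Nat => 2 * (k : Int))).foldl
          (fun s' i => PySem.List.pySetD s' ((lst.length : Int) - i - 1) (PySem.List.pyGetD lst (i / 2) 0)) b))[p]? =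
      (pvZigzag lst lst.length (lst.length / 2) (lst.length / 2 + 1))[p]? := by
  have hlen1 : (((List.range L).map (fun k : Nat => 2 * (k : Int))).foldl
      (fun s' i => PySem.List.pySetD s' ((lst.length : Int) - i - 1) (PySem.List.pyGetD lst (i / 2) 0)) b).length
      = b.length := length_foldl_pySetD _ _ _ b
  rw [loop2_char lst _ L (L - 1) (by omega) p]
  rw [loop1_char lst b lst.length hb L (by omega) p]
  have hc : lst.length - lst.length / 2 = lst.length / 2 + 1 := by omega
  rw [← hc]
  rw [pvZigzag_getElem? lst lst.length rfl (lst.length / 2) (by omega) p]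
  rcases Nat.mod_two_eq_zero_or_one p with hpar | hpar
  · -- even position: from the first loop / the downward pointer
    rw [if_neg (by omega), if_pos (by omega), if_pos hpar, if_pos (by omega)]
    have hidx : (lst.length - 1 - p) / 2 = lst.length / 2 - p / 2 := by omega
    rw [hidx, List.getD_eq_getElem?_getD, List.getElem?_eq_getElem (by omega)]
    rfl
  · -- odd position: from the second loop / the upward pointer
    rw [if_pos (by constructor; exact hpar; omega), if_neg (by omega), if_pos (by omega)]
    have hidx : (p - 1) / 2 + L = lst.length - lst.length / 2 + (p - 1) / 2 := by omega
    rw [hidx, List.getD_eq_getElem?_getD, List.getElem?_eq_getElem (by omega)]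
    rfl

-- ===== VERDICT (by name: the statement is the Claim_ definition above) =====
theorem sort_mapping_spec : Claim_equal_sort_mapping := by
  intro img_list _ hpre
  show sort_mapping img_list = sort_mapping_alt img_list
  cases img_list with
  | nil => exact absurd rfl hpre
  | cons q rest =>
    by_cases hpar : (q :: rest).length % 2 = 0
    · -- even length: the head is the QR element, the loops act on rest
      have hm : rest.length % 2 = 1 := by simp at hpar ⊢; omega
      have hcondA : (((rest.length + 1 : Nat) : Int) % 2 == 0) = true := by
        simp only [beq_iff_eq]; push_cast; omega
      have hcondB : ((rest.length + 1) % 2 == 0) = true := by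
        simp only [beq_iff_eq]; omega
      simp only [sort_mapping, sort_mapping_alt, List.length_cons]
      rw [if_pos hcondA, if_pos hcondB]
      dsimp only
      have e1 : ((rest.length + 1 : Nat) : Int) - 1 = (rest.length : Int) := by push_cast; ring
      simp only [e1, List.drop_succ_cons, List.drop_zero, PySem.List.pyGetD_zero_cons,
        PySem.List.pySetD_natCast]
      have eL : ((rest.length : Int) + 1) / 2 = (((rest.length + 1) / 2 : Nat) : Int) := by omega
      simp only [eL]
      have eR : (rest.length : Int) - (((rest.length + 1) / 2 : Nat) : Int)
          = (((rest.length + 1) / 2 - 1 : Nat) : Int) := by omega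
      simp only [eR]
      rw [pyRange_zero_two, pyRange_two_two]
      have hIlen : (pvZigzag rest rest.length (rest.length / 2) (rest.length / 2 + 1)).length
          = rest.length := by
        have hc : rest.length - rest.length / 2 = rest.length / 2 + 1 := by omega
        rw [← hc, pvZigzag_length rest rest.length (rest.length / 2) (by omega)]
        omega
      apply List.ext_getElem?
      intro p
      by_cases hplt : p < rest.length
      · rw [core_getElem? rest _ ((rest.length + 1) / 2) (by omega) (by omega)
            (by simp) p hplt]
        rw [List.getElem?_append, if_pos (by rw [hIlen]; exact hplt)]
      · rw [loop2_char rest _ ((rest.length + 1) / 2) ((rest.length + 1) / 2 - 1)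
            (by rw [length_foldl_pySetD]; simp; omega) p]
        rw [if_neg (by omega)]
        rw [loop1_char rest _ rest.length (by simp) ((rest.length + 1) / 2) (by omega) p]
        rw [if_neg (by omega)]
        rw [List.getElem?_set]
        rw [List.getElem?_append, hIlen, if_neg hplt]
        by_cases hpm : rest.length = p
        · rw [if_pos hpm, if_pos (by simp)]
          rw [← hpm, Nat.sub_self]
          simp
        · rw [if_neg hpm]
          rw [List.getElem?_eq_none (by simp; omega), List.getElem?_eq_none (by simp; omega)]
    · -- odd length: no QR slot, the loops act on the whole list
      have hm : (q :: rest).length % 2 = 1 := by omega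
      have hcondA : ¬ ((((rest.length + 1 : Nat) : Int) % 2 == 0) = true) := by
        simp only [beq_iff_eq]; push_cast; simp at hm ⊢; omega
      have hcondB : ¬ (((rest.length + 1) % 2 == 0) = true) := by
        simp only [beq_iff_eq]; simp at hm ⊢; omega
      simp only [sort_mapping, sort_mapping_alt, List.length_cons]
      rw [if_neg hcondA, if_neg hcondB]
      dsimp only
      have eL : (((rest.length + 1 : Nat) : Int) + 1) / 2
          = (((rest.length + 1 + 1) / 2 : Nat) : Int) := by push_cast; omega
      simp only [eL]
      have eR : (((rest.length + 1 : Nat) : Int)) - (((rest.length + 1 + 1) / 2 : Nat) : Int)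
          = (((rest.length + 1 + 1) / 2 - 1 : Nat) : Int) := by
        have : (rest.length + 1) % 2 = 1 := by simp at hm; omega
        push_cast; omega
      simp only [eR]
      rw [pyRange_zero_two, pyRange_two_two]
      have hIlen : (pvZigzag (q :: rest) (rest.length + 1) ((rest.length + 1) / 2)
          ((rest.length + 1) / 2 + 1)).length = rest.length + 1 := by
        have hc : rest.length + 1 - (rest.length + 1) / 2 = (rest.length + 1) / 2 + 1 := by
          simp at hm; omega
        rw [← hc, pvZigzag_length (q :: rest) (rest.length + 1) ((rest.length + 1) / 2)
          (by omega)]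
        simp at hm; omega
      apply List.ext_getElem?
      intro p
      by_cases hplt : p < rest.length + 1
      · have := core_getElem? (q :: rest) (List.replicate (rest.length + 1) 0)
            ((rest.length + 1 + 1) / 2) (by simp at hm ⊢; omega) (by omega)
            (by simp) p (by simpa using hplt)
        simp only [List.length_cons] at this
        rw [this]
      · rw [loop2_char (q :: rest) _ ((rest.length + 1 + 1) / 2) ((rest.length + 1 + 1) / 2 - 1)
            (by rw [length_foldl_pySetD]; simp at hm ⊢; omega) p]
        rw [if_neg (by simp at hm; omega)]
        rw [loop1_char (q :: rest) _ (rest.length + 1) (by simp) ((rest.length + 1 + 1) / 2)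
            (by simp at hm; omega) p]
        rw [if_neg (by omega)]
        rw [List.getElem?_eq_none (by simp; omega), List.getElem?_eq_none (by rw [hIlen]; simp at hm; omega)]
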